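-- pv_equiv track=rewrite | github.com/tysjosh/Runsheet | Runsheet-backend/middleware/auth_policy.py | get_policy_for_route
-- ===== SOURCE A (Python) =====
-- from enum import Enum
-- from typing import Any, Dict, List, Optional
--
-- class AuthPolicy(str, Enum):
--     """Authentication policy for endpoints."""
--     JWT_REQUIRED = "jwt_required"
--     API_KEY_REQUIRED = "api_key_required"
--     WEBHOOK_HMAC = "webhook_hmac"
--     PUBLIC = "public"
--
-- POLICY_MATRIX: Dict[str, AuthPolicy] = {
--     "/api/scheduling": AuthPolicy.JWT_REQUIRED,
--     "/api/ops/admin": AuthPolicy.JWT_REQUIRED,   # admin role required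
--     "/api/ops": AuthPolicy.JWT_REQUIRED,
--     "/api/fuel": AuthPolicy.JWT_REQUIRED,
--     "/api/agent": AuthPolicy.JWT_REQUIRED,
--     "/api/chat": AuthPolicy.JWT_REQUIRED,
--     "/api/chat/clear": AuthPolicy.JWT_REQUIRED,
--     "/api/data": AuthPolicy.JWT_REQUIRED,
--     "/ws": AuthPolicy.JWT_REQUIRED,
--     "/health": AuthPolicy.PUBLIC,
--     "/docs": AuthPolicy.PUBLIC,
--     "/openapi.json": AuthPolicy.PUBLIC,
--     "/redoc": AuthPolicy.PUBLIC,
--     "/": AuthPolicy.PUBLIC,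
-- }
--
-- POLICY_EXCEPTIONS: Dict[str, AuthPolicy] = {
--     "GET /api/agent/health": AuthPolicy.PUBLIC,
--     "GET /api/health": AuthPolicy.PUBLIC,
--     "GET /ws/agent-activity": AuthPolicy.PUBLIC,  # read-only
-- }
--
-- def get_policy_for_route(method: str, path: str) -> AuthPolicy:
--     """Determine the effective AuthPolicy for a given method + path.
--
--     Checks POLICY_EXCEPTIONS first, then matches against POLICY_MATRIX
--     prefixes. Falls back to JWT_REQUIRED if no match is found.
--
--     Args:
--         method: HTTP method (e.g., "GET", "POST").
--         path: The route path (e.g., "/api/agent/health").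
--
--     Returns:
--         The effective AuthPolicy for this route.
--     """
--     # Check per-route exceptions first
--     exception_key = f"{method} {path}"
--     if exception_key in POLICY_EXCEPTIONS:
--         return POLICY_EXCEPTIONS[exception_key]
--
--     # Match against policy matrix prefixes (longest prefix first)
--     sorted_prefixes = sorted(POLICY_MATRIX.keys(), key=len, reverse=True)
--     for prefix in sorted_prefixes:
--         if path == prefix or path.startswith(prefix + "/") or (
--             prefix != "/" and path.startswith(prefix)
--         ):
--             return POLICY_MATRIX[prefix]
--
--     # Special case: exact match for "/"
--     if path == "/" and "/" in POLICY_MATRIX: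
--         return POLICY_MATRIX["/"]
--
--     # Default to JWT_REQUIRED for unmatched routes (Req 5.5)
--     return AuthPolicy.JWT_REQUIRED
-- ===== SOURCE B (Python) =====
-- from enum import Enum
-- from typing import Dict
--
-- class AuthPolicy(str, Enum):
--     """Authentication policy for endpoints."""
--     JWT_REQUIRED = "jwt_required"
--     API_KEY_REQUIRED = "api_key_required"
--     WEBHOOK_HMAC = "webhook_hmac"
--     PUBLIC = "public"
--
-- POLICY_MATRIX: Dict[str, AuthPolicy] = {
--     "/api/scheduling": AuthPolicy.JWT_REQUIRED,
--     "/api/ops/admin": AuthPolicy.JWT_REQUIRED,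
--     "/api/ops": AuthPolicy.JWT_REQUIRED,
--     "/api/fuel": AuthPolicy.JWT_REQUIRED,
--     "/api/agent": AuthPolicy.JWT_REQUIRED,
--     "/api/chat": AuthPolicy.JWT_REQUIRED,
--     "/api/chat/clear": AuthPolicy.JWT_REQUIRED,
--     "/api/data": AuthPolicy.JWT_REQUIRED,
--     "/ws": AuthPolicy.JWT_REQUIRED,
--     "/health": AuthPolicy.PUBLIC,
--     "/docs": AuthPolicy.PUBLIC,
--     "/openapi.json": AuthPolicy.PUBLIC,
--     "/redoc": AuthPolicy.PUBLIC,
--     "/": AuthPolicy.PUBLIC,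
-- }
--
-- POLICY_EXCEPTIONS: Dict[str, AuthPolicy] = {
--     "GET /api/agent/health": AuthPolicy.PUBLIC,
--     "GET /api/health": AuthPolicy.PUBLIC,
--     "GET /ws/agent-activity": AuthPolicy.PUBLIC,
-- }
--
-- def get_policy_for_route(method: str, path: str) -> AuthPolicy:
--     """Single-pass longest-prefix match: no sorting, no trailing special case."""
--     policy = POLICY_EXCEPTIONS.get(f"{method} {path}")
--     if policy is not None:
--         return policy
--     best_len = -1
--     best_policy = AuthPolicy.JWT_REQUIRED
--     for prefix, pol in POLICY_MATRIX.items():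
--         if (path == prefix or path.startswith(prefix + "/") or (
--                 prefix != "/" and path.startswith(prefix))) and len(prefix) > best_len:
--             best_len, best_policy = len(prefix), pol
--     return best_policy
-- ===== Notes on version B (the rewrite author's own statement) =====
-- stated objective: simpler
-- what changed: Replaced the sort-by-length-then-first-match loop (plus the dead trailing '/' special case) by a single unsorted pass over POLICY_MATRIX that tracks the longest matching prefix; distinct equal-length prefixes cannot both match one path, so the longest match is unique and no tie-breaking sort is needed.
import Mathlib
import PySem

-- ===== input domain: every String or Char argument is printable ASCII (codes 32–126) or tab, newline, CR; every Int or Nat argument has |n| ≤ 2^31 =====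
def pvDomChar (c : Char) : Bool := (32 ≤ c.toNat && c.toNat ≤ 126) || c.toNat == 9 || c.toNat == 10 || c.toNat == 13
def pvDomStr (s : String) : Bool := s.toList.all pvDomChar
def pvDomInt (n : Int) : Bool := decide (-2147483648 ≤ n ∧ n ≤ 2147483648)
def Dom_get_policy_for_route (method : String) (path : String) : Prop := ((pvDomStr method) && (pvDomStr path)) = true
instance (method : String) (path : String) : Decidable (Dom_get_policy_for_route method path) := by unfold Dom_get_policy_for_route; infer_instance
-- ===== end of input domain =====

-- B replaces A's sort-by-length-then-first-match scan (and its dead trailing "/" special case)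
-- by one unsorted pass tracking the longest matching prefix: simpler, no sort.

-- ===== PORT A =====
def POLICY_MATRIX : PySem.Dict String String := PySem.Dict.ofList
  [("/api/scheduling", "jwt_required"),
   ("/api/ops/admin", "jwt_required"),
   ("/api/ops", "jwt_required"),
   ("/api/fuel", "jwt_required"),
   ("/api/agent", "jwt_required"),
   ("/api/chat", "jwt_required"),
   ("/api/chat/clear", "jwt_required"),
   ("/api/data", "jwt_required"),
   ("/ws", "jwt_required"),
   ("/health", "public"),
   ("/docs", "public"),
   ("/openapi.json", "public"),
   ("/redoc", "public"),
   ("/", "public")]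

def POLICY_EXCEPTIONS : PySem.Dict String String := PySem.Dict.ofList
  [("GET /api/agent/health", "public"),
   ("GET /api/health", "public"),
   ("GET /ws/agent-activity", "public")]

-- A's `for prefix in sorted_prefixes: …` first-match loop, then A's code after the loop
def pvMatrixLoop (path : String) : List String → String
  | [] =>
      -- Special case: exact match for "/"
      if path == "/" && POLICY_MATRIX.contains "/" then (POLICY_MATRIX.get? "/").getD "jwt_required"
      -- Default to JWT_REQUIRED for unmatched routes (Req 5.5)
      else "jwt_required"
  | pre :: rest =>
      if path == pre || PySem.Str.startswith path (pre ++ "/") ||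
         (pre != "/" && PySem.Str.startswith path pre)
      then (POLICY_MATRIX.get? pre).getD "jwt_required"   -- POLICY_MATRIX[prefix]; key always present
      else pvMatrixLoop path rest

def get_policy_for_route (method : String) (path : String) : String :=
  let exception_key := method ++ " " ++ path
  match POLICY_EXCEPTIONS.get? exception_key with   -- `if exception_key in POLICY_EXCEPTIONS: return …`
  | some v => v
  | none =>
      let sorted_prefixes := PySem.List.sorted POLICY_MATRIX.keys (fun s => PySem.Str.len s) true
      pvMatrixLoop path sorted_prefixes

-- ===== PORT B =====
def get_policy_for_route_alt (method : String) (path : String) : String :=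
  match POLICY_EXCEPTIONS.get? (method ++ " " ++ path) with   -- POLICY_EXCEPTIONS.get(f"{method} {path}")
  | some policy => policy
  | none =>
      (POLICY_MATRIX.items.foldl
        (fun (st : Int × String) kv =>
          if (path == kv.1 || PySem.Str.startswith path (kv.1 ++ "/") ||
              (kv.1 != "/" && PySem.Str.startswith path kv.1))
             && decide (st.1 < PySem.Str.len kv.1)
          then (PySem.Str.len kv.1, kv.2) else st)
        ((-1 : Int), "jwt_required")).2

-- ===== PRECONDITION & SPEC =====
def Spec_get_policy_for_route (method : String) (path : String) (out : String) : Prop := out = get_policy_for_route_alt method path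
instance (method : String) (path : String) (out : String) : Decidable (Spec_get_policy_for_route method path out) := by unfold Spec_get_policy_for_route; infer_instance

-- ===== CLAIM (what is proved, stated in full; the proofs are below) =====
def Claim_equal_get_policy_for_route : Prop := ∀ (method : String) (path : String), Dom_get_policy_for_route method path → Spec_get_policy_for_route method path (get_policy_for_route method path)

-- ===== LEMMAS AND PROOFS =====
-- the match predicate of both programs, for a fixed path (proof-side abbreviation)
def pvP (path pre : String) : Bool :=
  path == pre || PySem.Str.startswith path (pre ++ "/") || (pre != "/" && PySem.Str.startswith path pre)

-- one step of B's longest-match fold (definitionally the lambda inside get_policy_for_route_alt)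
def pvStep (path : String) (st : Int × String) (kv : String × String) : Int × String :=
  if pvP path kv.1 && decide (st.1 < PySem.Str.len kv.1) then (PySem.Str.len kv.1, kv.2) else st

-- the concrete value of A's sorted(POLICY_MATRIX.keys(), key=len, reverse=True)
theorem pvSortedKeys :
    PySem.List.sorted POLICY_MATRIX.keys (fun s => PySem.Str.len s) true =
      ["/api/scheduling", "/api/chat/clear", "/api/ops/admin", "/openapi.json",
       "/api/agent", "/api/fuel", "/api/chat", "/api/data", "/api/ops",
       "/health", "/redoc", "/docs", "/ws", "/"] := by decide

theorem pvMatrixItems :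
    POLICY_MATRIX.items =
      [("/api/scheduling", "jwt_required"), ("/api/ops/admin", "jwt_required"),
       ("/api/ops", "jwt_required"), ("/api/fuel", "jwt_required"),
       ("/api/agent", "jwt_required"), ("/api/chat", "jwt_required"),
       ("/api/chat/clear", "jwt_required"), ("/api/data", "jwt_required"),
       ("/ws", "jwt_required"), ("/health", "public"), ("/docs", "public"),
       ("/openapi.json", "public"), ("/redoc", "public"), ("/", "public")] := by decide

-- B's fold leaves the state alone when no entry can beat it
theorem pvFoldSkip (path : String) (l : List (String × String)) (st : Int × String)
    (h : ∀ kv ∈ l, pvP path kv.1 = true → PySem.Str.len kv.1 ≤ st.1) :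
    l.foldl (pvStep path) st = st := by
  induction l generalizing st with
  | nil => rfl
  | cons a l ih =>
    have hstep : pvStep path st a = st := by
      by_cases hp : pvP path a.1 = true
      · have hle := h a (by simp) hp
        simp only [pvStep, hp, Bool.true_and, decide_eq_true_eq]
        exact if_neg (by omega)
      · simp [pvStep, hp]
    rw [List.foldl_cons, hstep]
    exact ih st (fun kv hkv hp => h kv (by simp [hkv]) hp)

-- B's fold returns the policy of the longest matching prefix
theorem pvFoldMax (path : String) (l : List (String × String)) (st : Int × String)
    (pre pol : String) (hmem : (pre, pol) ∈ l) (hp : pvP path pre = true)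
    (hlt : st.1 < PySem.Str.len pre)
    (hmax : ∀ kv ∈ l, pvP path kv.1 = true → PySem.Str.len kv.1 ≤ PySem.Str.len pre)
    (huniq : ∀ kv ∈ l, pvP path kv.1 = true → PySem.Str.len kv.1 = PySem.Str.len pre → kv.2 = pol) :
    (l.foldl (pvStep path) st).2 = pol := by
  revert hmem hmax huniq hlt st
  induction l with
  | nil => intro st hmem _ _ _; simp at hmem
  | cons a l ih =>
    intro st hmem hlt hmax huniq
    rw [List.foldl_cons]
    by_cases hpa : pvP path a.1 = true
    · by_cases hup : st.1 < PySem.Str.len a.1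
      · have hstep : pvStep path st a = (PySem.Str.len a.1, a.2) := by
          simp only [pvStep, hpa, Bool.true_and, decide_eq_true_eq]
          exact if_pos hup
        rw [hstep]
        by_cases heq : PySem.Str.len a.1 = PySem.Str.len pre
        · have hval : a.2 = pol := huniq a (by simp) hpa heq
          rw [pvFoldSkip path l _ (fun kv hkv hkp => by
            show PySem.Str.len kv.1 ≤ PySem.Str.len a.1
            exact le_of_le_of_eq (hmax kv (by simp [hkv]) hkp) heq.symm)]
          exact hval
        · have hmem' : (pre, pol) ∈ l := by
            rcases List.mem_cons.mp hmem with h' | h'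
            · exact absurd (by rw [← h']) heq
            · exact h'
          have hle : PySem.Str.len a.1 ≤ PySem.Str.len pre := hmax a (by simp) hpa
          exact ih (PySem.Str.len a.1, a.2) hmem'
            (show PySem.Str.len a.1 < PySem.Str.len pre from lt_of_le_of_ne hle heq)
            (fun kv hkv hkp => hmax kv (by simp [hkv]) hkp)
            (fun kv hkv hkp hl => huniq kv (by simp [hkv]) hkp hl)
      · have hstep : pvStep path st a = st := by
          simp only [pvStep, Bool.and_eq_true, decide_eq_true_eq]
          exact if_neg (fun hc => hup hc.2)
        rw [hstep]
        have hmem' : (pre, pol) ∈ l := by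
          rcases List.mem_cons.mp hmem with h' | h'
          · exact absurd (by rw [← h']; exact hlt) hup
          · exact h'
        exact ih st hmem' hlt (fun kv hkv hkp => hmax kv (by simp [hkv]) hkp)
          (fun kv hkv hkp hl => huniq kv (by simp [hkv]) hkp hl)
    · have hstep : pvStep path st a = st := by simp [pvStep, hpa]
      rw [hstep]
      have hmem' : (pre, pol) ∈ l := by
        rcases List.mem_cons.mp hmem with h' | h'
        · exact absurd (by rw [← h']; exact hp) hpa
        · exact h'
      exact ih st hmem' hlt (fun kv hkv hkp => hmax kv (by simp [hkv]) hkp)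
        (fun kv hkv hkp hl => huniq kv (by simp [hkv]) hkp hl)

-- ===== VERDICT (by name: the statement is the Claim_ definition above) =====
theorem get_policy_for_route_spec : Claim_equal_get_policy_for_route := by
  intro method path _
  unfold Spec_get_policy_for_route get_policy_for_route get_policy_for_route_alt
  cases h : POLICY_EXCEPTIONS.get? (method ++ " " ++ path) with
  | some v => simp only [h]
  | none =>
    simp only [h]
    show pvMatrixLoop path (PySem.List.sorted POLICY_MATRIX.keys (fun s => PySem.Str.len s) true)
        = (POLICY_MATRIX.items.foldl (pvStep path) (-1, "jwt_required")).2
    rw [pvSortedKeys, pvMatrixItems]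
    simp only [pvMatrixLoop, ← pvP.eq_1]
    by_cases h1 : pvP path "/api/scheduling" = true
    · rw [if_pos h1, pvFoldMax path _ _ "/api/scheduling" "jwt_required" (by decide) h1 (by decide)
          (fun kv hkv hp => by fin_cases hkv <;> first | decide | simp_all)
          (fun kv hkv hp hlen => by fin_cases hkv <;> first | rfl | (revert hlen; decide) | simp_all)]
      decide
    rw [if_neg h1]
    by_cases h2 : pvP path "/api/chat/clear" = true
    · rw [if_pos h2, pvFoldMax path _ _ "/api/chat/clear" "jwt_required" (by decide) h2 (by decide)
          (fun kv hkv hp => by fin_cases hkv <;> first | decide | simp_all)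
          (fun kv hkv hp hlen => by fin_cases hkv <;> first | rfl | (revert hlen; decide) | simp_all)]
      decide
    rw [if_neg h2]
    by_cases h3 : pvP path "/api/ops/admin" = true
    · rw [if_pos h3, pvFoldMax path _ _ "/api/ops/admin" "jwt_required" (by decide) h3 (by decide)
          (fun kv hkv hp => by fin_cases hkv <;> first | decide | simp_all)
          (fun kv hkv hp hlen => by fin_cases hkv <;> first | rfl | (revert hlen; decide) | simp_all)]
      decide
    rw [if_neg h3]
    by_cases h4 : pvP path "/openapi.json" = true
    · rw [if_pos h4, pvFoldMax path _ _ "/openapi.json" "public" (by decide) h4 (by decide)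
          (fun kv hkv hp => by fin_cases hkv <;> first | decide | simp_all)
          (fun kv hkv hp hlen => by fin_cases hkv <;> first | rfl | (revert hlen; decide) | simp_all)]
      decide
    rw [if_neg h4]
    by_cases h5 : pvP path "/api/agent" = true
    · rw [if_pos h5, pvFoldMax path _ _ "/api/agent" "jwt_required" (by decide) h5 (by decide)
          (fun kv hkv hp => by fin_cases hkv <;> first | decide | simp_all)
          (fun kv hkv hp hlen => by fin_cases hkv <;> first | rfl | (revert hlen; decide) | simp_all)]
      decide
    rw [if_neg h5]
    by_cases h6 : pvP path "/api/fuel" = true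
    · rw [if_pos h6, pvFoldMax path _ _ "/api/fuel" "jwt_required" (by decide) h6 (by decide)
          (fun kv hkv hp => by fin_cases hkv <;> first | decide | simp_all)
          (fun kv hkv hp hlen => by fin_cases hkv <;> first | rfl | (revert hlen; decide) | simp_all)]
      decide
    rw [if_neg h6]
    by_cases h7 : pvP path "/api/chat" = true
    · rw [if_pos h7, pvFoldMax path _ _ "/api/chat" "jwt_required" (by decide) h7 (by decide)
          (fun kv hkv hp => by fin_cases hkv <;> first | decide | simp_all)
          (fun kv hkv hp hlen => by fin_cases hkv <;> first | rfl | (revert hlen; decide) | simp_all)]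
      decide
    rw [if_neg h7]
    by_cases h8 : pvP path "/api/data" = true
    · rw [if_pos h8, pvFoldMax path _ _ "/api/data" "jwt_required" (by decide) h8 (by decide)
          (fun kv hkv hp => by fin_cases hkv <;> first | decide | simp_all)
          (fun kv hkv hp hlen => by fin_cases hkv <;> first | rfl | (revert hlen; decide) | simp_all)]
      decide
    rw [if_neg h8]
    by_cases h9 : pvP path "/api/ops" = true
    · rw [if_pos h9, pvFoldMax path _ _ "/api/ops" "jwt_required" (by decide) h9 (by decide)
          (fun kv hkv hp => by fin_cases hkv <;> first | decide | simp_all)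
          (fun kv hkv hp hlen => by fin_cases hkv <;> first | rfl | (revert hlen; decide) | simp_all)]
      decide
    rw [if_neg h9]
    by_cases h10 : pvP path "/health" = true
    · rw [if_pos h10, pvFoldMax path _ _ "/health" "public" (by decide) h10 (by decide)
          (fun kv hkv hp => by fin_cases hkv <;> first | decide | simp_all)
          (fun kv hkv hp hlen => by fin_cases hkv <;> first | rfl | (revert hlen; decide) | simp_all)]
      decide
    rw [if_neg h10]
    by_cases h11 : pvP path "/redoc" = true
    · rw [if_pos h11, pvFoldMax path _ _ "/redoc" "public" (by decide) h11 (by decide)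
          (fun kv hkv hp => by fin_cases hkv <;> first | decide | simp_all)
          (fun kv hkv hp hlen => by fin_cases hkv <;> first | rfl | (revert hlen; decide) | simp_all)]
      decide
    rw [if_neg h11]
    by_cases h12 : pvP path "/docs" = true
    · rw [if_pos h12, pvFoldMax path _ _ "/docs" "public" (by decide) h12 (by decide)
          (fun kv hkv hp => by fin_cases hkv <;> first | decide | simp_all)
          (fun kv hkv hp hlen => by fin_cases hkv <;> first | rfl | (revert hlen; decide) | simp_all)]
      decide
    rw [if_neg h12]
    by_cases h13 : pvP path "/ws" = true
    · rw [if_pos h13, pvFoldMax path _ _ "/ws" "jwt_required" (by decide) h13 (by decide)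
          (fun kv hkv hp => by fin_cases hkv <;> first | decide | simp_all)
          (fun kv hkv hp hlen => by fin_cases hkv <;> first | rfl | (revert hlen; decide) | simp_all)]
      decide
    rw [if_neg h13]
    by_cases h14 : pvP path "/" = true
    · rw [if_pos h14, pvFoldMax path _ _ "/" "public" (by decide) h14 (by decide)
          (fun kv hkv hp => by fin_cases hkv <;> first | decide | simp_all)
          (fun kv hkv hp hlen => by fin_cases hkv <;> first | rfl | (revert hlen; decide) | simp_all)]
      decide
    rw [if_neg h14]
    rw [pvFoldSkip path _ _ (fun kv hkv hp => by fin_cases hkv <;> simp_all)]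
    simp only [pvP] at h14
    simp_all
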